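-- pv_equiv track=rewrite | github.com/nf-core/rnadnavar | bin/filter_mutations.py | filter_homopolymer
-- ===== SOURCE A (Python) =====
-- def filter_homopolymer(ref_context, alt, hp_length=6):
--     """
--     Checks if the variant is in a homopolymer context
--     """
--     homopolymer = False
--     if len(alt) > 1:
--         alt = alt[1:]  # if insertion the check will be done
--     elif alt == "-":  # if deletion no homopolymer
--         return False
--     elif ref_context == None:
--         return None
--     # we calculatate the actual length of the sequence we need to check
--     # context is as follows: flank_before:REF:flank_after (flanks are same length)
--     try:
--         length_to_consider = int((len(ref_context) - 1) / 2)
--     except TypeError: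
--         return None
--     # we substitute the ref for the alt to check the context of the variant
--     ref_context = list(ref_context)
--     ref_context[length_to_consider] = alt
--     ref_context = "".join(ref_context)
--     # only the contact that would overlap with the expected hp_length
--     # (i.e. some context does not need to be consider as it is too far)
--     context_to_consider = ref_context[length_to_consider - hp_length + 1 : length_to_consider + hp_length]
--     # count the bases that are equal. If count >= hp_length it will be consider a homopolymer
--     for idx, base in enumerate(context_to_consider):
--         context_window = context_to_consider[idx : idx + hp_length]
--         if len(context_window) < hp_length:
--             break  # what is left of the sequence to check is too short
--         elif len(set(context_window)) == 1:
--             homopolymer = True  # bingo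
--             break
--     return homopolymer
-- ===== SOURCE B (Python) =====
-- def filter_homopolymer(ref_context, alt, hp_length=6):
--     """
--     Checks if the variant is in a homopolymer context.
--     Different decomposition: early "-"/None guards (correct since "-" has length 1),
--     slice-based substitution, and a single run-length scan instead of per-index
--     windows with set().
--     """
--     if alt == "-":  # deletion: no homopolymer (len("-") == 1, so same as A's elif)
--         return False
--     if ref_context is None:
--         return None
--     ins = alt[1:] if len(alt) > 1 else alt  # insertion: check the inserted bases
--     mid = (len(ref_context) - 1) // 2
--     seq = ref_context[:mid] + ins + ref_context[mid + 1:]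
--     context = seq[mid - hp_length + 1 : mid + hp_length]
--     # one pass tracking the length of the current run of equal characters
--     homopolymer = False
--     run, prev = 0, None
--     for ch in context:
--         run = run + 1 if ch == prev else 1
--         prev = ch
--         if run >= hp_length:
--             homopolymer = True
--     return homopolymer
-- ===== Notes on version B (the rewrite author's own statement) =====
-- stated objective: simpler
-- what changed: A's guard cascade and per-index sliding-window check (building a set of each hp_length-sized window) are replaced by early '-'/None guards, a slice-based single-expression substitution instead of list/setitem/join, and one run-length pass over the context that records in a flag whether any run of equal characters reaches hp_length.
-- outside the precondition, e.g. on filter_homopolymer('X', 'GCATTTGGTAT', -4): A returns False, B returns True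
import Mathlib
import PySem

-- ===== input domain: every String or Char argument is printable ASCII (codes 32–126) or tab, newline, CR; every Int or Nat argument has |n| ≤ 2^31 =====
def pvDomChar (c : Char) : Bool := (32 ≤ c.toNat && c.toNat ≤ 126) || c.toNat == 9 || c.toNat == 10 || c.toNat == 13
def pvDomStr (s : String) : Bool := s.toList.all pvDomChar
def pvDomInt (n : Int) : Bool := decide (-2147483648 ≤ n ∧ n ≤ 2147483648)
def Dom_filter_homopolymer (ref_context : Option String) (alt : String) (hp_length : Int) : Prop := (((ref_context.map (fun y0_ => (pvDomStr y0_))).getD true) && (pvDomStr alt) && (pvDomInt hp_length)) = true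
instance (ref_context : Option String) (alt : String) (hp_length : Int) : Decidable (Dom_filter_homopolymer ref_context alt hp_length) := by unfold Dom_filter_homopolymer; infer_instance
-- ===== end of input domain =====

-- B replaces A's guard cascade and per-index hp_length-sized set() windows by early guards,
-- slice-based substitution and one run-length fold over the context (objective: simpler).

-- ===== PORT A =====
-- for idx, base in enumerate(context_to_consider): window = context[idx:idx+hp]; break / set-check
def fhAscan (ctx : List Char) (hp : Int) : List (Int × Char) → Bool
  | [] => false
  | (idx, _) :: rest =>
    let window := PySem.List.slice ctx (some idx) (some (idx + hp))
    if (window.length : Int) < hp then false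
    else if PySem.Set.len (PySem.Set.ofList window) = 1 then true
    else fhAscan ctx hp rest

-- the body after the alt/"-"/None branches; rc = None here means len(None) → TypeError → return None
def fhAmain (rc : Option String) (altL : List Char) (hp : Int) : Option Bool :=
  match rc with
  | none => none
  | some s =>
    let chars := s.toList
    -- int((len(ref_context) - 1) / 2): exact, the float is exact and int() truncates toward zero
    let l : Int := ((chars.length : Int) - 1).tdiv 2
    -- ref_context = list(ref_context); ref_context[l] = alt; "".join(ref_context)
    -- (l is in range whenever s ≠ ""; s = "" raises IndexError in Python and is outside Pre_)
    let pieces := (chars.map (fun c => [c])).set l.toNat altL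
    let ref' := pieces.flatten
    let ctx := PySem.List.slice ref' (some (l - hp + 1)) (some (l + hp))
    some (fhAscan ctx hp (PySem.List.enumerate ctx 0))

def filter_homopolymer (ref_context : Option String) (alt : String) (hp_length : Int) : Option Bool :=
  let altL := alt.toList
  if altL.length > 1 then
    fhAmain ref_context (PySem.List.slice altL (some 1) none) hp_length
  else if altL = ['-'] then some false
  else if ref_context = none then none
  else fhAmain ref_context altL hp_length

-- ===== PORT B =====
-- if alt == "-": return False; if ref_context is None: return None;
-- ins = alt[1:] if len(alt) > 1 else alt; seq = rc[:mid] + ins + rc[mid+1:];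
-- context = seq[mid-hp+1 : mid+hp]; run-length fold with a sticky homopolymer flag
def filter_homopolymer_alt (ref_context : Option String) (alt : String) (hp_length : Int) : Option Bool :=
  if alt = "-" then some false
  else
    match ref_context with
    | none => none
    | some s =>
      let altL := alt.toList
      let ins := if altL.length > 1 then PySem.List.slice altL (some 1) none else altL
      let chars := s.toList
      let mid := PySem.Int.floordiv ((chars.length : Int) - 1) 2
      let seq := PySem.List.slice chars none (some mid) ++ ins ++ PySem.List.slice chars (some (mid + 1)) none
      let ctx := PySem.List.slice seq (some (mid - hp_length + 1)) (some (mid + hp_length))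
      some ((ctx.foldl (fun st c =>
          let run := if some c = st.1 then st.2.1 + 1 else 1
          (some c, run, st.2.2 || decide (hp_length ≤ run)))
        ((none : Option Char), (0 : Int), false)).2.2)

-- ===== PRECONDITION & SPEC =====
-- Pre_ excludes (1) ref_context = "" with alt ≠ "-", where A raises an uncaught IndexError, and
-- (2) non-positive hp_length where the considered slice can be non-empty: there A's value is an
-- accident of Python's negative-slice wraparound and B's of a trivially satisfied run bound —
-- no behaviour is specified for a non-positive homopolymer length (non-positive hp_length whose
-- slice is provably empty stays inside Pre_, where both return False).
def Pre_filter_homopolymer (ref_context : Option String) (alt : String) (hp_length : Int) : Prop :=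
  (ref_context = some "" → alt = "-") ∧
  (1 ≤ hp_length ∨
    0 ≤ PySem.Int.floordiv ((((ref_context.getD "").toList.length : Int)) - 1) 2 + hp_length ∨
    (alt.toList.length : Int) + ((ref_context.getD "").toList.length : Int) ≤ 2 - 2 * hp_length)
instance (ref_context : Option String) (alt : String) (hp_length : Int) : Decidable (Pre_filter_homopolymer ref_context alt hp_length) := by unfold Pre_filter_homopolymer; infer_instance

def pvWitness_filter_homopolymer : Option String × String × Int := (some "CGTAAAAAAGT", "T", 6)

def Spec_filter_homopolymer (ref_context : Option String) (alt : String) (hp_length : Int) (out : Option Bool) : Prop := out = filter_homopolymer_alt ref_context alt hp_length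
instance (ref_context : Option String) (alt : String) (hp_length : Int) (out : Option Bool) : Decidable (Spec_filter_homopolymer ref_context alt hp_length out) := by unfold Spec_filter_homopolymer; infer_instance

-- ===== CLAIM (what is proved, stated in full; the proofs are below) =====
def Claim_equal_filter_homopolymer : Prop := ∀ (ref_context : Option String) (alt : String) (hp_length : Int), Dom_filter_homopolymer ref_context alt hp_length → Pre_filter_homopolymer ref_context alt hp_length → Spec_filter_homopolymer ref_context alt hp_length (filter_homopolymer ref_context alt hp_length)

-- ===== LEMMAS AND PROOFS =====

-- B's fold written as a named function (definitionally equal to the fold inlined in the port)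
def runFold (hp : Int) (ctx : List Char) : Bool :=
  (ctx.foldl (fun st c =>
      let run := if some c = st.1 then st.2.1 + 1 else 1
      (some c, run, st.2.2 || decide (hp ≤ run)))
    ((none : Option Char), (0 : Int), false)).2.2

-- B's body for a present ref_context (proof-side name for the port's inline let-chain)
def bBody (s : String) (ins : List Char) (hp : Int) : Bool :=
  let chars := s.toList
  let mid := PySem.Int.floordiv ((chars.length : Int) - 1) 2
  let seq := PySem.List.slice chars none (some mid) ++ ins ++ PySem.List.slice chars (some (mid + 1)) none
  let ctx := PySem.List.slice seq (some (mid - hp + 1)) (some (mid + hp))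
  runFold hp ctx

-- early-exit form of the run-length scan, used only to bridge the fold to winScan
def fhBscan (hp : Int) : List Char → Option Char → Int → Bool
  | [], _, _ => false
  | c :: rest, prev, run =>
    let run' := if some c = prev then run + 1 else 1
    if hp ≤ run' then true else fhBscan hp rest (some c) run'

-- reference form of the window scan: drop indices, recurse on the context itself
def winScan (hp : Int) : List Char → Bool
  | [] => false
  | c :: rest =>
    let window := (c :: rest).take hp.toNat
    if (window.length : Int) < hp then false
    else if PySem.Set.len (PySem.Set.ofList window) = 1 then true
    else winScan hp rest

theorem setlen_cast (s : PySem.Set Char) : PySem.Set.len s = (List.length s : Int) := by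
  simp [PySem.Set.len]

-- len(set(w)) = 1 for a non-empty all-equal list
theorem setlen_replicate (c : Char) (h : Nat) (hh : 1 ≤ h) :
    PySem.Set.len (PySem.Set.ofList (List.replicate h c)) = 1 := by
  rw [setlen_cast]
  have hnd := PySem.Set.nodup_ofList (List.replicate h c)
  have hmem : ∀ x, x ∈ PySem.Set.ofList (List.replicate h c) ↔ x ∈ List.replicate h c := by
    intro x; exact PySem.Set.mem_ofList _ _
  have hc : c ∈ PySem.Set.ofList (List.replicate h c) := by
    rw [hmem]; exact List.mem_replicate.mpr ⟨by omega, rfl⟩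
  have hall : ∀ x ∈ PySem.Set.ofList (List.replicate h c), x = c := by
    intro x hx; exact (List.mem_replicate.mp ((hmem x).mp hx)).2
  match hl : (PySem.Set.ofList (List.replicate h c) : List Char) with
  | [] => rw [hl] at hc; simp at hc
  | [x] => simp
  | x :: y :: t =>
    rw [hl] at hnd hall
    have hx := hall x (by simp)
    have hy := hall y (by simp)
    subst hx
    rw [hy] at hnd
    simp at hnd

-- len(set(w)) ≠ 1 when w contains two distinct elements
theorem setlen_ne (w : List Char) (a b : Char) (ha : a ∈ w) (hb : b ∈ w) (hne : a ≠ b) :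
    ¬ PySem.Set.len (PySem.Set.ofList w) = 1 := by
  rw [setlen_cast]
  intro h
  have h1 : (PySem.Set.ofList w : List Char).length = 1 := by exact_mod_cast h
  obtain ⟨z, hz⟩ := List.length_eq_one_iff.mp h1
  have ha' : a ∈ PySem.Set.ofList w := (PySem.Set.mem_ofList _ _).mpr ha
  have hb' : b ∈ PySem.Set.ofList w := (PySem.Set.mem_ofList _ _).mpr hb
  rw [hz] at ha' hb'
  simp at ha' hb'
  exact hne (ha'.trans hb'.symm)

-- winScan returns false when the list is shorter than hp
theorem winScan_short (hp : Int) (_hhp : 1 ≤ hp) :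
    ∀ (l : List Char), (l.length : Int) < hp → winScan hp l = false := by
  intro l
  induction l with
  | nil => intro _; rfl
  | cons c rest ih =>
    intro hl
    simp only [List.length_cons] at hl
    rw [winScan]
    split_ifs with h1 h2
    · rfl
    · exfalso
      apply h1
      simp only [List.length_take, List.length_cons]
      push_cast
      omega
    · exact ih (by push_cast at hl ⊢; omega)

-- A's enumerate/index loop equals winScan
theorem aScan_eq_winScan (ctx : List Char) (hp : Int) (hhp : 1 ≤ hp) :
    ∀ (ys : List Char) (s : Nat), ctx.drop s = ys →
      fhAscan ctx hp (PySem.List.enumerate ys (s : Int)) = winScan hp ys := by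
  intro ys
  induction ys with
  | nil => intro s hs; simp [PySem.List.enumerate, fhAscan, winScan]
  | cons y ys' ih =>
    intro s hs
    rw [PySem.List.enumerate_cons]
    show fhAscan ctx hp _ = winScan hp (y :: ys')
    rw [fhAscan, winScan]
    have hcast : (s : Int) + hp = ((s + hp.toNat : Nat) : Int) := by
      push_cast; omega
    have hw : PySem.List.slice ctx (some (s : Int)) (some ((s : Int) + hp)) =
        (y :: ys').take hp.toNat := by
      rw [hcast, PySem.List.slice_natCast, hs]
      congr 1
      omega
    rw [hw]
    have hs' : ctx.drop (s + 1) = ys' := by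
      rw [← List.tail_drop, hs]; rfl
    have hcast2 : ((s : Int) + 1) = ((s + 1 : Nat) : Int) := by push_cast; ring
    rw [hcast2, ih (s + 1) hs']

-- a run of fewer than hp leading c's followed by a different char changes nothing
theorem winScan_skip (hp : Int) (x c : Char) (hne : x ≠ c) (xs : List Char) :
    ∀ (r : Nat), (r : Int) < hp →
      winScan hp (List.replicate r c ++ x :: xs) = winScan hp (x :: xs) := by
  intro r
  induction r with
  | zero => intro _; simp
  | succ r ih =>
    intro hr
    have hhp : 1 ≤ hp := by omega
    rw [List.replicate_succ, List.cons_append, winScan]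
    split_ifs with h1 h2
    · -- whole list shorter than hp ⇒ x :: xs too
      simp only [List.length_take, List.length_cons, List.length_append,
        List.length_replicate] at h1
      refine (winScan_short hp hhp _ ?_).symm
      simp only [List.length_cons]
      push_cast at h1 ⊢
      omega
    · -- window contains both c (head) and x (position r+1): not all equal
      exfalso
      simp only [List.length_take, List.length_cons, List.length_append,
        List.length_replicate] at h1
      push_cast at h1
      have hxc : x ∈ List.take hp.toNat (c :: (List.replicate r c ++ x :: xs)) := by
        rw [List.mem_take_iff_getElem]
        refine ⟨r + 1, by simp; omega, ?_⟩
        simp [List.getElem_cons_succ, List.getElem_append_right (by simp : (List.replicate r c).length ≤ r)]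
      have hcc : c ∈ List.take hp.toNat (c :: (List.replicate r c ++ x :: xs)) := by
        rw [List.mem_take_iff_getElem]
        exact ⟨0, by simp; omega, by simp⟩
      exact setlen_ne _ x c hxc hcc hne h2
    · exact ih (by omega)

-- B's run scan in mid-run state equals winScan on the run prefix restored
theorem bScan_eq_winScan (hp : Int) :
    ∀ (xs : List Char) (c : Char) (r : Nat), 1 ≤ r → (r : Int) < hp →
      fhBscan hp xs (some c) (r : Int) = winScan hp (List.replicate r c ++ xs) := by
  intro xs
  induction xs with
  | nil =>
    intro c r hr1 hr2
    rw [fhBscan]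
    refine (winScan_short hp (by omega) _ ?_).symm
    simp
    omega
  | cons x xs' ih =>
    intro c r hr1 hr2
    rw [fhBscan]
    by_cases hxc : x = c
    · subst hxc
      have hrun : (if some x = some x then (r : Int) + 1 else 1) = (r : Int) + 1 := by simp
      rw [hrun]
      have hlist : List.replicate r x ++ x :: xs' = List.replicate (r + 1) x ++ xs' := by
        rw [List.replicate_succ']
        simp
      rw [hlist]
      by_cases hend : hp ≤ (r : Int) + 1
      · have hpr : hp = (r : Int) + 1 := by omega
        rw [if_pos hend]
        have hcons : List.replicate (r + 1) x ++ xs' = x :: (List.replicate r x ++ xs') := by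
          simp [List.replicate_succ]
        have hwin : List.take hp.toNat (x :: (List.replicate r x ++ xs')) = List.replicate (r + 1) x := by
          rw [← hcons, List.take_append_of_le_length (by simp; omega), List.take_replicate]
          congr 1
          omega
        rw [hcons, winScan]
        rw [hwin]
        rw [if_neg (by simp only [List.length_replicate]; push_cast; omega)]
        rw [if_pos (setlen_replicate x (r + 1) (by omega))]
      · rw [if_neg hend]
        have := ih x (r + 1) (by omega) (by push_cast; omega)
        push_cast at this ⊢
        rw [this]
    · have hrun : (if some x = some c then (r : Int) + 1 else 1) = 1 := by simp [hxc]
      rw [hrun]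
      rw [if_neg (show ¬ hp ≤ (1 : Int) by omega)]
      have := ih x 1 (le_refl 1) (by push_cast; omega)
      push_cast at this
      rw [this]
      simp only [List.singleton_append]
      exact (winScan_skip hp x c hxc xs' r hr2).symm

theorem bScan_top (hp : Int) (h1 : 1 ≤ hp) (ctx : List Char) :
    fhBscan hp ctx none 0 = winScan hp ctx := by
  cases ctx with
  | nil => rfl
  | cons x xs =>
    rw [fhBscan]
    have hrun : (if some x = none then (0 : Int) + 1 else 1) = 1 := by simp
    rw [hrun]
    by_cases hend : hp ≤ (1 : Int)
    · have hpr : hp = 1 := by omega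
      rw [if_pos hend, winScan]
      have hwin : List.take hp.toNat (x :: xs) = List.replicate 1 x := by
        rw [hpr]; simp
      rw [hwin]
      rw [if_neg (by simp only [List.length_replicate]; omega)]
      rw [if_pos (setlen_replicate x 1 (le_refl 1))]
    · rw [if_neg hend]
      have := bScan_eq_winScan hp xs x 1 (le_refl 1) (by omega)
      push_cast at this
      rw [this]
      simp

-- the sticky flag is absorbing: once true, the fold's flag stays true
theorem fold_true (hp : Int) :
    ∀ (xs : List Char) (p : Option Char) (r : Int),
      (xs.foldl (fun st c =>
          let run := if some c = st.1 then st.2.1 + 1 else 1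
          (some c, run, st.2.2 || decide (hp ≤ run))) (p, r, true)).2.2 = true := by
  intro xs
  induction xs with
  | nil => intro p r; rfl
  | cons c rest ih => intro p r; simp only [List.foldl_cons]; exact ih _ _

-- with the flag still false, the fold agrees with the early-exit scan
theorem fold_eq_bScan (hp : Int) :
    ∀ (xs : List Char) (p : Option Char) (r : Int),
      (xs.foldl (fun st c =>
          let run := if some c = st.1 then st.2.1 + 1 else 1
          (some c, run, st.2.2 || decide (hp ≤ run))) (p, r, false)).2.2 = fhBscan hp xs p r := by
  intro xs
  induction xs with
  | nil => intro p r; rfl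
  | cons c rest ih =>
    intro p r
    simp only [List.foldl_cons]
    rw [fhBscan]
    by_cases h : hp ≤ (if some c = p then r + 1 else 1)
    · rw [if_pos h]
      simp only [Bool.false_or, decide_eq_true h]
      exact fold_true hp rest _ _
    · rw [if_neg h]
      simp only [Bool.false_or, decide_eq_false h]
      exact ih _ _

theorem runFold_eq_winScan (hp : Int) (h1 : 1 ≤ hp) (ctx : List Char) :
    runFold hp ctx = winScan hp ctx := by
  rw [runFold, fold_eq_bScan hp ctx none 0, bScan_top hp h1 ctx]

theorem flatten_map_singleton (l : List Char) : (l.map (fun c => [c])).flatten = l := by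
  induction l with
  | nil => rfl
  | cons a t ih => simp [ih]

-- list(s); s[L] = w; "".join(...)  =  s[:L] + w + s[L+1:]
theorem subst_join (w : List Char) :
    ∀ (xs : List Char) (L : Nat), L < xs.length →
      ((xs.map (fun c => [c])).set L w).flatten = xs.take L ++ w ++ xs.drop (L + 1) := by
  intro xs
  induction xs with
  | nil => intro L hL; simp at hL
  | cons c rest ih =>
    intro L hL
    cases L with
    | zero => simp [flatten_map_singleton]
    | succ L' =>
      simp only [List.map_cons, List.set_cons_succ, List.flatten_cons, List.take_succ_cons,
        List.drop_succ_cons]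
      rw [ih L' (by simpa using hL)]
      simp

-- the two bodies agree for any non-empty ref string under Pre_'s hp_length disjunction
theorem main_eq (s : String) (w : List Char) (hp : Int) (hs : s ≠ "")
    (hpre : 1 ≤ hp ∨ 0 ≤ PySem.Int.floordiv ((s.toList.length : Int) - 1) 2 + hp ∨
            (w.length : Int) + (s.toList.length : Int) ≤ 2 - 2 * hp) :
    fhAmain (some s) w hp = some (bBody s w hp) := by
  have hne : s.toList ≠ [] := fun h => hs (String.toList_eq_nil_iff.mp h)
  have hn : 1 ≤ s.toList.length := List.length_pos_of_ne_nil hne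
  set chars := s.toList with hchars
  set n := chars.length with hnn
  set L : Nat := (n - 1) / 2 with hLdef
  have hL : L < n := by omega
  have hdivA : ((n : Int) - 1).tdiv 2 = (L : Int) := by
    have h1 : ((n : Int) - 1) = ((n - 1 : Nat) : Int) := by omega
    rw [h1, Int.tdiv_eq_ediv]
    simp only [Int.natCast_nonneg, true_or, if_pos]
    omega
  have hdivB : PySem.Int.floordiv ((n : Int) - 1) 2 = (L : Int) := by
    rw [PySem.Int.floordiv_eq_ediv_of_pos (by norm_num)]
    omega
  simp only [fhAmain, bBody]
  rw [hdivA, hdivB, Int.toNat_natCast]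
  rw [subst_join w chars L hL]
  rw [PySem.List.slice_to_natCast]
  rw [show ((L : Int) + 1) = ((L + 1 : Nat) : Int) by push_cast; ring]
  rw [PySem.List.slice_from_natCast]
  set ref' : List Char := chars.take L ++ w ++ chars.drop (L + 1) with href
  set ctx : List Char := PySem.List.slice ref' (some ((L : Int) - hp + 1)) (some ((L : Int) + hp)) with hctxdef
  by_cases hhp : 1 ≤ hp
  · congr 1
    rw [show (0 : Int) = ((0 : Nat) : Int) by simp]
    rw [aScan_eq_winScan ctx hp hhp ctx 0 rfl]
    exact (runFold_eq_winScan hp hhp ctx).symm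
  · -- hp ≤ 0: the considered slice is empty, both scans return False
    have hNlen : ref'.length = n - 1 + w.length := by
      rw [href]
      simp only [List.length_append, List.length_take, List.length_drop]
      omega
    have hm : ∃ m : Nat, hp = -(m : Int) := ⟨(-hp).toNat, by omega⟩
    obtain ⟨m, hmeq⟩ := hm
    have hctx : ctx = [] := by
      apply List.eq_nil_of_length_eq_zero
      rw [hctxdef, PySem.List.length_slice]
      have ha : ((L : Int) - hp + 1) = ((L + m + 1 : Nat) : Int) := by omega
      rw [ha, PySem.List.clampIdx_natCast]
      by_cases hLm : m ≤ L
      · have hb : ((L : Int) + hp) = ((L - m : Nat) : Int) := by omega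
        rw [hb, PySem.List.clampIdx_natCast]
        omega
      · have hb : ((L : Int) + hp) = -((m - L : Nat) : Int) := by omega
        rw [hb, PySem.List.clampIdx_neg_natCast _ _ (by omega)]
        have h3 : (w.length : Int) + (n : Int) ≤ 2 - 2 * hp := by
          rcases hpre with h | h | h
          · omega
          · rw [hdivB] at h; omega
          · exact h
        omega
    rw [hctx]
    rfl

-- "alt == '-'" seen on the character-list side
theorem str_dash_iff (alt : String) : alt = "-" ↔ alt.toList = ['-'] := by
  constructor
  · intro h; rw [h]; rfl
  · intro h
    exact String.toList_inj.mp (by rw [h]; rfl)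

-- B for a present ref_context, in terms of bBody
theorem alt_some (s : String) (alt : String) (hp : Int) (hne : ¬ alt = "-") :
    filter_homopolymer_alt (some s) alt hp =
      some (bBody s (if alt.toList.length > 1 then PySem.List.slice alt.toList (some 1) none else alt.toList) hp) := by
  simp only [filter_homopolymer_alt, if_neg hne]
  rfl

theorem filter_homopolymer_spec' :
    ∀ (ref_context : Option String) (alt : String) (hp_length : Int),
      Pre_filter_homopolymer ref_context alt hp_length →
      filter_homopolymer ref_context alt hp_length = filter_homopolymer_alt ref_context alt hp_length := by
  intro rc alt hp hpre
  obtain ⟨hpre1, hpre2⟩ := hpre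
  by_cases hdash : alt = "-"
  · -- alt == "-" (length 1): A's elif fires, B's first guard fires
    subst hdash; rfl
  · have hLne : ¬ alt.toList = ['-'] := fun h => hdash ((str_dash_iff alt).mpr h)
    cases rc with
    | none =>
      simp only [filter_homopolymer, filter_homopolymer_alt, if_neg hdash]
      by_cases h1 : alt.toList.length > 1
      · rw [if_pos h1]; rfl
      · rw [if_neg h1, if_neg hLne]; simp
    | some s =>
      have hs : s ≠ "" := by
        intro hse; subst hse; exact hdash (hpre1 rfl)
      rw [alt_some s alt hp hdash]
      simp only [filter_homopolymer]
      by_cases h1 : alt.toList.length > 1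
      · rw [if_pos h1, if_pos h1]
        apply main_eq s _ hp hs
        simp only [Option.getD_some] at hpre2
        rcases hpre2 with h | h | h
        · exact Or.inl h
        · exact Or.inr (Or.inl h)
        · refine Or.inr (Or.inr ?_)
          have hlen : ((PySem.List.slice alt.toList (some 1) none).length : Int) ≤ (alt.toList.length : Int) := by
            rw [PySem.List.slice_from_one]
            simp [List.length_tail]
          omega
      · rw [if_neg h1, if_neg h1, if_neg hLne]
        rw [if_neg (by simp : ¬ (some s : Option String) = none)]
        apply main_eq s _ hp hs
        simpa using hpre2

-- ===== VERDICT (by name: the statement is the Claim_ definition above) =====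
theorem filter_homopolymer_spec : Claim_equal_filter_homopolymer := by
  intro ref_context alt hp_length _hdom hpre
  exact filter_homopolymer_spec' ref_context alt hp_length hpre
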